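-- pv_equiv track=rewrite | github.com/MrBrantCode/unitest_baseline | mut_generate/mist_train_taco/taco_17743/solution.py | calculate_infection_turns
-- ===== SOURCE A (Python) =====
-- def calculate_infection_turns(lst):
--     m = 0
--     l = 0
--     for i, n in enumerate(lst):
--         if n == 0:
--             m = i if l == 0 else max(m, (i - l + 1) // 2)
--             l = i + 1
--     return max(m, len(lst) - l)
-- ===== SOURCE B (Python) =====
-- def calculate_infection_turns(lst):
--     zeros = [i for i, n in enumerate(lst) if n == 0]
--     if not zeros:
--         return len(lst)
--     best = zeros[0]
--     for a, b in zip(zeros, zeros[1:]):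
--         best = max(best, (b - a) // 2)
--     return max(best, len(lst) - zeros[-1] - 1)
-- ===== Notes on version B (the rewrite author's own statement) =====
-- stated objective: alternative
-- what changed: B first extracts the list of zero positions and then takes the max of the head index, the halved consecutive-pair gaps (via zip), and the tail length, replacing A's single stateful scan with mode flag l.
import Mathlib
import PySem

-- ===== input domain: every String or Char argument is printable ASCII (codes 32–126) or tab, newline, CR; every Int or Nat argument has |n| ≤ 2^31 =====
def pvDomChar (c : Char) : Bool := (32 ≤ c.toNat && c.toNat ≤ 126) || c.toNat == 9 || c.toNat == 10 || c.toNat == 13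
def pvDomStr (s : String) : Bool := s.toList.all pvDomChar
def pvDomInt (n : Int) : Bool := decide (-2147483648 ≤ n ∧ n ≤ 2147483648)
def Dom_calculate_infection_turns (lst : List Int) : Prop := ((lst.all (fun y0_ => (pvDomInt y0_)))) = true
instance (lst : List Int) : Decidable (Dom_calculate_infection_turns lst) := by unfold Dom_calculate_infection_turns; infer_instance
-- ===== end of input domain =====

-- B replaces A's single stateful scan (mode flag l) by extracting the zero
-- positions first and maximising over head index, halved pair gaps, tail
-- length (objective: alternative decomposition, same O(n) cost).

-- ===== PORT A =====
-- A-side helper: the body of A's for-loop (state = (m, l))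
def pvStepA (s : Int × Int) (p : Int × Int) : Int × Int :=
  if p.2 == 0 then
    (if s.2 == 0 then p.1 else max s.1 (PySem.Int.floordiv (p.1 - s.2 + 1) 2), p.1 + 1)
  else s

def calculate_infection_turns (lst : List Int) : Int :=
  let st := (PySem.List.enumerate lst).foldl pvStepA (0, 0)
  max st.1 ((lst.length : Int) - st.2)

-- ===== PORT B =====
-- B-side helper: the body of B's for-loop over consecutive zero pairs
def pvStepB (b : Int) (p : Int × Int) : Int :=
  max b (PySem.Int.floordiv (p.2 - p.1) 2)

def calculate_infection_turns_alt (lst : List Int) : Int :=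
  let zeros := ((PySem.List.enumerate lst).filter (fun p => p.2 == 0)).map Prod.fst
  match zeros with
  | [] => (lst.length : Int)
  | z0 :: rest =>
    let best := ((z0 :: rest).zip rest).foldl pvStepB z0
    max best ((lst.length : Int) - rest.getLastD z0 - 1)

-- ===== PRECONDITION & SPEC =====
def Spec_calculate_infection_turns (lst : List Int) (out : Int) : Prop := out = calculate_infection_turns_alt lst
instance (lst : List Int) (out : Int) : Decidable (Spec_calculate_infection_turns lst out) := by unfold Spec_calculate_infection_turns; infer_instance

-- ===== CLAIM (what is proved, stated in full; the proofs are below) =====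
def Claim_equal_calculate_infection_turns : Prop := ∀ (lst : List Int), Dom_calculate_infection_turns lst → Spec_calculate_infection_turns lst (calculate_infection_turns lst)

-- ===== LEMMAS AND PROOFS =====

-- zero positions of lst when enumeration starts at s
def pvZeros (lst : List Int) (s : Int) : List Int :=
  ((PySem.List.enumerate lst s).filter (fun p => p.2 == 0)).map Prod.fst

theorem pvZeros_nil (s : Int) : pvZeros [] s = [] := rfl

theorem pvZeros_cons_zero (xs : List Int) (s : Int) :
    pvZeros (0 :: xs) s = s :: pvZeros xs (s + 1) := by
  simp [pvZeros, PySem.List.enumerate_cons]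

theorem pvZeros_cons_ne (x : Int) (hx : x ≠ 0) (xs : List Int) (s : Int) :
    pvZeros (x :: xs) s = pvZeros xs (s + 1) := by
  simp [pvZeros, PySem.List.enumerate_cons, hx]

-- the scan after the first zero: m accumulates halved gaps, l tracks last zero + 1
theorem pvFold_pos (lst : List Int) : ∀ (s prev m : Int), 0 ≤ prev → 0 ≤ s →
    (PySem.List.enumerate lst s).foldl pvStepA (m, prev + 1) =
      (((prev :: pvZeros lst s).zip (pvZeros lst s)).foldl pvStepB m,
       (pvZeros lst s).getLastD prev + 1) := by
  induction lst with
  | nil => intro s prev m _ _; simp [pvZeros_nil, PySem.List.enumerate_nil]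
  | cons x xs ih =>
    intro s prev m hprev hs
    rw [PySem.List.enumerate_cons, List.foldl_cons]
    by_cases hx : x = 0
    · subst hx
      have h1 : prev + 1 ≠ 0 := by omega
      have hstep : pvStepA (m, prev + 1) (s, 0) =
          (max m (PySem.Int.floordiv (s - prev) 2), s + 1) := by
        simp [pvStepA, h1]
        congr 1
        omega
      rw [hstep, ih (s + 1) s (max m (PySem.Int.floordiv (s - prev) 2)) hs (by omega),
        pvZeros_cons_zero]
      simp only [List.zip_cons_cons, List.foldl_cons, List.getLastD_cons, pvStepB]
    · have hstep : pvStepA (m, prev + 1) (s, x) = (m, prev + 1) := by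
        simp [pvStepA, hx]
      rw [hstep, ih (s + 1) prev m hprev (by omega), pvZeros_cons_ne x hx]

-- the scan before the first zero: state stays (m, 0); the first zero seeds (z0, z0+1)
theorem pvFold_zero (lst : List Int) : ∀ (s m : Int), 0 ≤ s →
    (PySem.List.enumerate lst s).foldl pvStepA (m, 0) =
      (match pvZeros lst s with
       | [] => (m, 0)
       | z0 :: rest => (((z0 :: rest).zip rest).foldl pvStepB z0, rest.getLastD z0 + 1)) := by
  induction lst with
  | nil => intro s m _; simp [pvZeros_nil, PySem.List.enumerate_nil]
  | cons x xs ih =>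
    intro s m hs
    rw [PySem.List.enumerate_cons, List.foldl_cons]
    by_cases hx : x = 0
    · subst hx
      have hstep : pvStepA (m, 0) (s, 0) = (s, s + 1) := by simp [pvStepA]
      rw [hstep, pvFold_pos xs (s + 1) s s hs (by omega), pvZeros_cons_zero]
    · have hstep : pvStepA (m, 0) (s, x) = (m, 0) := by simp [pvStepA, hx]
      rw [hstep, ih (s + 1) m (by omega), pvZeros_cons_ne x hx]

-- ===== VERDICT (by name: the statement is the Claim_ definition above) =====
theorem calculate_infection_turns_spec : Claim_equal_calculate_infection_turns := by
  intro lst _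
  unfold Spec_calculate_infection_turns calculate_infection_turns calculate_infection_turns_alt
  have hz : ((PySem.List.enumerate lst).filter (fun p => p.2 == 0)).map Prod.fst
      = pvZeros lst 0 := rfl
  rw [hz, pvFold_zero lst 0 0 le_rfl]
  cases h : pvZeros lst 0 with
  | nil => simp
  | cons z0 rest => simp; congr 1; omega
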